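-- pv_equiv track=rewrite | github.com/mugiwaraluffy141/Revit-Tool_Python | Management Tools.tab/View Filter.panel/Lib/Filter/core.py | CountParamFilter
-- ===== SOURCE A (Python) =====
-- def CountParamFilter(filterParamId,filterIdList):
--     noRuleFilter, oneRuleFilter, moreRuleFilter = [],[],[]
--     for ind,sublst in enumerate(filterParamId):
--         if len(sublst) == 0:
--             noRuleFilter.append(filterIdList[ind])
--         elif len(sublst) == 1:
--             oneRuleFilter.append(filterIdList[ind])
--         else:
--             moreRuleFilter.append(filterIdList[ind])
--     return noRuleFilter, oneRuleFilter, moreRuleFilter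
-- ===== SOURCE B (Python) =====
-- def CountParamFilter(filterParamId, filterIdList):
--     no = [filterIdList[i] for i, s in enumerate(filterParamId) if len(s) == 0]
--     one = [filterIdList[i] for i, s in enumerate(filterParamId) if len(s) == 1]
--     more = [filterIdList[i] for i, s in enumerate(filterParamId) if len(s) > 1]
--     return no, one, more
-- ===== Notes on version B (the rewrite author's own statement) =====
-- stated objective: simpler
-- what changed: Replaces the single classifying loop with three mutually exclusive accumulators by three independent filtering comprehensions over the enumerated input, one per bucket.
import Mathlib
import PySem

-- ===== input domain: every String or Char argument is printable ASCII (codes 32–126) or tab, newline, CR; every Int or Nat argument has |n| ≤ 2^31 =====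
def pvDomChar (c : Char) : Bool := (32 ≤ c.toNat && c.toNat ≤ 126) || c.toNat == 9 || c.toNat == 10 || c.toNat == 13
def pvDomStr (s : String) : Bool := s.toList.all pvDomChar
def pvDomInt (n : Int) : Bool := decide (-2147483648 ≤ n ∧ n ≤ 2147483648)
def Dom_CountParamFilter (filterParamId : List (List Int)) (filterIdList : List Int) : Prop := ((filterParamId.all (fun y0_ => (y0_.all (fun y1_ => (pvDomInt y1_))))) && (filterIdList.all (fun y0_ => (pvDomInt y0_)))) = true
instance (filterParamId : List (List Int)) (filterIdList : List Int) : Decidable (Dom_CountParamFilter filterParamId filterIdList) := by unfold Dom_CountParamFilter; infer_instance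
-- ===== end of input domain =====

-- B buckets the ids with three independent filtering comprehensions instead of A's one classifying loop (objective: simpler decomposition; same cost).

-- ===== PORT A =====
-- one pass over enumerate(filterParamId), appending filterIdList[ind] to one of three accumulators
def CountParamFilter (filterParamId : List (List Int)) (filterIdList : List Int) : List Int × List Int × List Int :=
  (PySem.List.enumerate filterParamId).foldl
    (fun acc p =>
      if p.2.length = 0 then (acc.1 ++ [PySem.List.pyGetD filterIdList p.1 0], acc.2.1, acc.2.2)
      else if p.2.length = 1 then (acc.1, acc.2.1 ++ [PySem.List.pyGetD filterIdList p.1 0], acc.2.2)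
      else (acc.1, acc.2.1, acc.2.2 ++ [PySem.List.pyGetD filterIdList p.1 0]))
    ([], [], [])

-- ===== PORT B =====
-- three filtering passes, one per bucket
def CountParamFilter_alt (filterParamId : List (List Int)) (filterIdList : List Int) : List Int × List Int × List Int :=
  (((PySem.List.enumerate filterParamId).filter (fun p => p.2.length == 0)).map (fun p => PySem.List.pyGetD filterIdList p.1 0),
   ((PySem.List.enumerate filterParamId).filter (fun p => p.2.length == 1)).map (fun p => PySem.List.pyGetD filterIdList p.1 0),
   ((PySem.List.enumerate filterParamId).filter (fun p => decide (p.2.length > 1))).map (fun p => PySem.List.pyGetD filterIdList p.1 0))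

-- ===== PRECONDITION & SPEC =====
-- Pre_ excludes exactly the inputs where filterIdList is shorter than filterParamId: there both A and B raise IndexError.
def Pre_CountParamFilter (filterParamId : List (List Int)) (filterIdList : List Int) : Prop :=
  filterParamId.length ≤ filterIdList.length
instance (filterParamId : List (List Int)) (filterIdList : List Int) : Decidable (Pre_CountParamFilter filterParamId filterIdList) := by unfold Pre_CountParamFilter; infer_instance
def pvWitness_CountParamFilter : List (List Int) × List Int := ([[1], [], [2, 3]], [10, 20, 30])
def Spec_CountParamFilter (filterParamId : List (List Int)) (filterIdList : List Int) (out : List Int × List Int × List Int) : Prop := out = CountParamFilter_alt filterParamId filterIdList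
instance (filterParamId : List (List Int)) (filterIdList : List Int) (out : List Int × List Int × List Int) : Decidable (Spec_CountParamFilter filterParamId filterIdList out) := by unfold Spec_CountParamFilter; infer_instance

-- ===== CLAIM (what is proved, stated in full; the proofs are below) =====
def Claim_equal_CountParamFilter : Prop := ∀ (filterParamId : List (List Int)) (filterIdList : List Int), Dom_CountParamFilter filterParamId filterIdList → Pre_CountParamFilter filterParamId filterIdList → Spec_CountParamFilter filterParamId filterIdList (CountParamFilter filterParamId filterIdList)

-- ===== LEMMAS AND PROOFS =====

-- A's fold over any prefix list l, started at (no, one, more), appends to each accumulator exactly B's filtered map of l.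
theorem countParamFilter_foldl (fl : List Int) (l : List (Int × List Int))
    (no one more : List Int) :
    l.foldl
      (fun acc p =>
        if p.2.length = 0 then (acc.1 ++ [PySem.List.pyGetD fl p.1 0], acc.2.1, acc.2.2)
        else if p.2.length = 1 then (acc.1, acc.2.1 ++ [PySem.List.pyGetD fl p.1 0], acc.2.2)
        else (acc.1, acc.2.1, acc.2.2 ++ [PySem.List.pyGetD fl p.1 0]))
      (no, one, more)
    = (no ++ (l.filter (fun p => p.2.length == 0)).map (fun p => PySem.List.pyGetD fl p.1 0),
       one ++ (l.filter (fun p => p.2.length == 1)).map (fun p => PySem.List.pyGetD fl p.1 0),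
       more ++ (l.filter (fun p => decide (p.2.length > 1))).map (fun p => PySem.List.pyGetD fl p.1 0)) := by
  induction l generalizing no one more with
  | nil => simp
  | cons hd tl ih =>
    by_cases h0 : hd.2.length = 0
    · rw [List.foldl_cons, if_pos h0, ih]
      simp [h0]
    · by_cases h1 : hd.2.length = 1
      · rw [List.foldl_cons, if_neg h0, if_pos h1, ih]
        simp [h1]
      · have h2 : 1 < hd.2.length := by omega
        rw [List.foldl_cons, if_neg h0, if_neg h1, ih]
        simp [h0, h1, h2]

-- ===== VERDICT (by name: the statement is the Claim_ definition above) =====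
theorem CountParamFilter_spec : Claim_equal_CountParamFilter := by
  intro fp fl _ _
  show CountParamFilter fp fl = CountParamFilter_alt fp fl
  unfold CountParamFilter CountParamFilter_alt
  simpa using countParamFilter_foldl fl (PySem.List.enumerate fp) [] [] []
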